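-- pv_equiv track=rewrite | github.com/mpillar/hackerrank | domains/algorithms/bit-manipulation/sum-vs-xor/main.py | solve
-- ===== SOURCE A (Python) =====
-- def solve(n):
--     """
--     Given n, find each x such that:
--        0 <= x <= n
--        n + x = n ^ x
--     Output the total number of integers x satisfying the criteria.
--
--     Approach:
--     Per https://www.geeksforgeeks.org/equal-sum-xor/, we count the unset
--     bits in n and the result is 2 ** (count of unset bits in n).
--     """
--
--     unset_bits = 0
--     while n > 0:
--         last_bit = n & 0x1
--         if last_bit == 0:
--             unset_bits += 1
--         n >>= 1
--
--     return 2 ** unset_bits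
-- ===== SOURCE B (Python) =====
-- def solve(n):
--     # closed form: number of unset bits below the MSB = bit_length - popcount
--     if n <= 0:
--         return 1
--     return 1 << (n.bit_length() - n.bit_count())
-- ===== Notes on version B (the rewrite author's own statement) =====
-- stated objective: idiomatic
-- what changed: Replaces the explicit bit-scanning while-loop with the closed form 1 << (n.bit_length() - n.bit_count()), guarding n <= 0 where the loop body never runs.
import Mathlib
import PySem

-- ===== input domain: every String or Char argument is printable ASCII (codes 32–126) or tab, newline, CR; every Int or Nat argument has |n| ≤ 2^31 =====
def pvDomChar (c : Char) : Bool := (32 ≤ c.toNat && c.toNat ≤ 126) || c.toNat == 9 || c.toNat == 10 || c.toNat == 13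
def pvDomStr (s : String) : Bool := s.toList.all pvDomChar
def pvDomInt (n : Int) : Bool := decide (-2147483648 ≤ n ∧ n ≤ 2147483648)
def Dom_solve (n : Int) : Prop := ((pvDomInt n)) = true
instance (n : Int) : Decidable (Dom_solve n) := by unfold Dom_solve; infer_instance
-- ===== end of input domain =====

-- B replaces A's bit-scanning while-loop by the closed form 1 << (bit_length - bit_count); same value everywhere.

-- ===== PORT A =====
-- the while-loop: scans bits of n, counting the unset ones
def solveLoop (n : Int) (unset : Nat) : Nat :=
  if _h : 0 < n then
    solveLoop (PySem.Int.floordiv n 2)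
      (if PySem.Int.band n 1 = 0 then unset + 1 else unset)
  else unset
termination_by n.toNat
decreasing_by
  have h2 : PySem.Int.floordiv n 2 = n / 2 := PySem.Int.floordiv_eq_ediv_of_pos (by omega)
  rw [h2]; omega

def solve (n : Int) : Int := 2 ^ solveLoop n 0

-- ===== PORT B =====
def solve_alt (n : Int) : Int :=
  if n ≤ 0 then 1
  else 1 <<< (PySem.Int.bitLength n - PySem.Int.bitCount n)

-- ===== PRECONDITION & SPEC =====
def Spec_solve (n : Int) (out : Int) : Prop := out = solve_alt n
instance (n : Int) (out : Int) : Decidable (Spec_solve n out) := by unfold Spec_solve; infer_instance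

-- ===== CLAIM (what is proved, stated in full; the proofs are below) =====
def Claim_equal_solve : Prop := ∀ (n : Int), Dom_solve n → Spec_solve n (solve n)

-- ===== LEMMAS AND PROOFS =====

-- loop invariant: for positive n, the loop adds exactly (bit_length - popcount) to the accumulator
theorem solveLoop_eq (k : Nat) : ∀ (n : Int) (acc : Nat), 0 ≤ n → n.toNat ≤ k →
    solveLoop n acc = acc + (PySem.Int.bitLength n - PySem.Int.bitCount n) := by
  induction k with
  | zero =>
    intro n acc h0 hle
    have hn0 : n = 0 := by omega
    subst hn0
    rw [solveLoop, dif_neg (by omega)]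
    simp [PySem.Int.bitLength_zero, PySem.Int.bitCount_zero]
  | succ k ih =>
    intro n acc h0 hle
    by_cases hn : 0 < n
    · rw [solveLoop, dif_pos hn]
      have hfd : PySem.Int.floordiv n 2 = n / 2 := PySem.Int.floordiv_eq_ediv_of_pos (by omega)
      have h1 : (0:Int) ≤ n / 2 := by omega
      have h2 : (n / 2).toNat ≤ k := by omega
      have hrec := ih (n / 2) (if PySem.Int.band n 1 = 0 then acc + 1 else acc) h1 h2
      rw [hfd, hrec]
      have hBL := PySem.Int.bitLength_of_pos (n := n) hn
      have hBC := PySem.Int.bitCount_of_pos (n := n) hn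
      have hle' : PySem.Int.bitCount ((n:Int) / 2) ≤ PySem.Int.bitLength ((n:Int) / 2) :=
        PySem.Int.bitCount_le_bitLength _
      have hband : PySem.Int.band n 1 = PySem.Int.mod n 2 := PySem.Int.band_one n
      have hmE : PySem.Int.mod n 2 = n % 2 := PySem.Int.mod_eq_emod_of_pos (by omega)
      have hmod2 : n % 2 = 0 ∨ n % 2 = 1 := by omega
      rw [hfd] at hBL hBC
      rw [hband, hmE, hBL, hBC, hmE]
      rcases hmod2 with hm | hm
      · rw [if_pos hm, hm]; omega
      · rw [if_neg (by omega), hm]; omega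
    · rw [solveLoop, dif_neg hn]
      have hn0 : n = 0 := by omega
      subst hn0
      simp [PySem.Int.bitLength_zero, PySem.Int.bitCount_zero]

-- ===== VERDICT (by name: the statement is the Claim_ definition above) =====
theorem solve_spec : Claim_equal_solve := by
  intro n _
  unfold Spec_solve solve solve_alt
  by_cases hn : n ≤ 0
  · rw [if_pos hn, solveLoop, dif_neg (by omega)]
    norm_num
  · rw [if_neg hn, solveLoop_eq n.toNat n 0 (by omega) le_rfl]
    simp [Int.shiftLeft_eq]
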